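-- pv_equiv track=rewrite | github.com/dhbw-ma-ppp/ppp-2023 | Exercises/JonasPutz/exercises_03.py | analyseNumbers
-- ===== SOURCE A (Python) =====
-- def analyseNumbers(lowerBound, upperBound):
--     """ Analyse numbers:
--
--         returns all numbers from lower bound (inclusiv) to upper bound (exclusiv)
--         which digits are in ascending order and include at least one digit exactly twice
--     """
--
--     numbers = []        #stores all valid numbers
--     digitCounter = []   #stores the count of 0's, 1's, ..., 9's
--     lastDigit = 0       #stores the last used digit
--     isValid = True      #stores if the number is valid
--
--     for number in range(lowerBound, upperBound):
--         lastDigit = 0           #resets all used values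
--         isValid = True
--         digitCounter = [0] * 10
--
--         for digit in map(int,str(number)):  #execute for each digit in the number (from left to right)
--             if digit < lastDigit:
--                 isValid = False             #if the digit is smaller than the last one, set the number to invalid
--                 break                       #this means, the digits are not ascending order
--             lastDigit = digit
--
--             digitCounter[digit] += 1        #increase the digit counter
--
--         isValid &= any(d == 2 for d in digitCounter)    #if the number is valid, test if any digit is included exactly twice
--
--         if isValid:
--             numbers.append(number)          #add the number to the list, if it is valid
--
--     return len(numbers)         #returns the number of numbers found
-- ===== SOURCE B (Python) =====
-- def analyseNumbers(lowerBound, upperBound):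
--     """Count numbers in [lowerBound, upperBound) whose digits are in ascending
--     order and where some digit occurs exactly twice.
--
--     Instead of a manual left-to-right scan with a last-digit register and a
--     10-slot counter array, check ascending order by comparing the digit list
--     with its sorted form, and the exactly-twice condition by counting each of
--     the ten digit characters directly in the list.
--     """
--     count = 0
--     for number in range(lowerBound, upperBound):
--         t = list(str(number))
--         if t == sorted(t) and any(t.count(d) == 2 for d in "0123456789"):
--             count += 1
--     return count
-- ===== Notes on version B (the rewrite author's own statement) =====
-- stated objective: simpler
-- what changed: The per-number validity test is re-decomposed: A scans digits left-to-right with a last-digit register, a break, and a mutated 10-slot counter array, then scans the array; B compares the character list with its sorted form and counts each of the ten digit characters directly, keeping a plain integer counter instead of building a list of valid numbers.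
import Mathlib
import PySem

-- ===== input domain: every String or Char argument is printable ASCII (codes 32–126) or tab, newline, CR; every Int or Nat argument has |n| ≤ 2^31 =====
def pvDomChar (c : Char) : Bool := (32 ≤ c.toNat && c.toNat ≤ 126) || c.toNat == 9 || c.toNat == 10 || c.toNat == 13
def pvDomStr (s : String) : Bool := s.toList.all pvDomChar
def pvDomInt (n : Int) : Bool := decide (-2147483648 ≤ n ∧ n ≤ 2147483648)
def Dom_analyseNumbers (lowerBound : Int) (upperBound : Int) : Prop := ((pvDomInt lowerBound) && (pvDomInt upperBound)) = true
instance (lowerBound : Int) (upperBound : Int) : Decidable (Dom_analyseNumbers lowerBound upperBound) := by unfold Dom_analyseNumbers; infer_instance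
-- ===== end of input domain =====

-- B replaces A's manual digit scan (last-digit register, break, mutated 10-slot counter
-- array, list of valid numbers) by comparing the digit list with its sorted form and
-- counting each of the ten digit characters directly; objective: simpler.

-- ===== PORT A =====
-- int(c) for a one-character string c, as A's `map(int, str(number))` applies it.
-- The `.getD 0` is only reached outside Pre_ (Python raises ValueError on '-').
def pvDigitVal (c : Char) : Int := (PySem.Int.ofChars? [c]).getD 0

-- digitCounter[digit] += 1  (indices are always 0..9 under Pre_)
def pvBump (cnt : List Int) (d : Int) : List Int :=
  PySem.List.pySetD cnt d (PySem.List.pyGetD cnt d 0 + 1)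

-- the inner `for digit in …` loop with its break: returns (isValid, digitCounter)
def pvInnerA : List Int → Int → List Int → Bool × List Int
  | [], _, cnt => (true, cnt)
  | d :: rest, lastDigit, cnt =>
      if d < lastDigit then (false, cnt)
      else pvInnerA rest d (pvBump cnt d)

def analyseNumbers (lowerBound : Int) (upperBound : Int) : Int :=
  let numbers := (PySem.List.pyRange lowerBound upperBound 1).foldl
    (fun numbers number =>
      let digits := (PySem.Int.toChars number).map pvDigitVal
      let r := pvInnerA digits 0 (List.replicate 10 (0 : Int))
      let isValid := r.1 && r.2.any (fun d => d == 2)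
      if isValid then numbers ++ [number] else numbers) []
  (numbers.length : Int)

-- ===== PORT B =====
def analyseNumbers_alt (lowerBound : Int) (upperBound : Int) : Int :=
  (PySem.List.pyRange lowerBound upperBound 1).foldl
    (fun count number =>
      let t := PySem.Int.toChars number   -- list(str(number))
      if t == PySem.List.sorted t (fun c => c) false
         && "0123456789".toList.any (fun d => PySem.List.count t d == 2)
      then count + 1 else count) 0

-- ===== PRECONDITION & SPEC =====
-- A raises ValueError (int('-')) as soon as the range contains a negative number;
-- Pre_ admits exactly the inputs on which A returns (nonnegative start, or empty range).
def Pre_analyseNumbers (lowerBound : Int) (upperBound : Int) : Prop :=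
  0 ≤ lowerBound ∨ upperBound ≤ lowerBound
instance (lowerBound : Int) (upperBound : Int) : Decidable (Pre_analyseNumbers lowerBound upperBound) := by unfold Pre_analyseNumbers; infer_instance
def pvWitness_analyseNumbers : Int × Int := (0, 120)

def Spec_analyseNumbers (lowerBound : Int) (upperBound : Int) (out : Int) : Prop := out = analyseNumbers_alt lowerBound upperBound
instance (lowerBound : Int) (upperBound : Int) (out : Int) : Decidable (Spec_analyseNumbers lowerBound upperBound out) := by unfold Spec_analyseNumbers; infer_instance

-- ===== CLAIM (what is proved, stated in full; the proofs are below) =====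
def Claim_equal_analyseNumbers : Prop := ∀ (lowerBound : Int) (upperBound : Int), Dom_analyseNumbers lowerBound upperBound → Pre_analyseNumbers lowerBound upperBound → Spec_analyseNumbers lowerBound upperBound (analyseNumbers lowerBound upperBound)
-- ===== LEMMAS AND PROOFS =====

-- the ten digit characters, and the value int(·) gives each of them
def pvDIGS : List Char := ['0','1','2','3','4','5','6','7','8','9']

theorem pv_digs_eq : "0123456789".toList = pvDIGS := rfl

theorem pv_val0 : pvDigitVal '0' = 0 := rfl
theorem pv_val1 : pvDigitVal '1' = 1 := rfl
theorem pv_val2 : pvDigitVal '2' = 2 := rfl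
theorem pv_val3 : pvDigitVal '3' = 3 := rfl
theorem pv_val4 : pvDigitVal '4' = 4 := rfl
theorem pv_val5 : pvDigitVal '5' = 5 := rfl
theorem pv_val6 : pvDigitVal '6' = 6 := rfl
theorem pv_val7 : pvDigitVal '7' = 7 := rfl
theorem pv_val8 : pvDigitVal '8' = 8 := rfl
theorem pv_val9 : pvDigitVal '9' = 9 := rfl

theorem pv_digitVal_bounds : ∀ c ∈ pvDIGS, 0 ≤ pvDigitVal c ∧ pvDigitVal c < 10 := by
  intro c hc
  fin_cases hc <;>
    simp [pv_val0, pv_val1, pv_val2, pv_val3, pv_val4, pv_val5, pv_val6, pv_val7, pv_val8, pv_val9]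

theorem pv_digitVal_mono : ∀ c ∈ pvDIGS, ∀ d ∈ pvDIGS, (pvDigitVal c ≤ pvDigitVal d ↔ c ≤ d) := by
  intro c hc d hd
  fin_cases hc <;> fin_cases hd <;>
    simp only [pv_val0, pv_val1, pv_val2, pv_val3, pv_val4, pv_val5, pv_val6, pv_val7, pv_val8, pv_val9] <;>
    decide

theorem pv_digitVal_inj : ∀ c ∈ pvDIGS, ∀ d ∈ pvDIGS, (pvDigitVal c = pvDigitVal d ↔ c = d) := by
  intro c hc d hd
  fin_cases hc <;> fin_cases hd <;>
    simp only [pv_val0, pv_val1, pv_val2, pv_val3, pv_val4, pv_val5, pv_val6, pv_val7, pv_val8, pv_val9] <;>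
    decide

theorem pv_digitVal_surj : ∀ j : Nat, j < 10 → ∃ d ∈ pvDIGS, pvDigitVal d = (j : Int) := by
  intro j hj
  interval_cases j
  · exact ⟨'0', by decide, by simp [pv_val0]⟩
  · exact ⟨'1', by decide, by simp [pv_val1]⟩
  · exact ⟨'2', by decide, by simp [pv_val2]⟩
  · exact ⟨'3', by decide, by simp [pv_val3]⟩
  · exact ⟨'4', by decide, by simp [pv_val4]⟩
  · exact ⟨'5', by decide, by simp [pv_val5]⟩
  · exact ⟨'6', by decide, by simp [pv_val6]⟩
  · exact ⟨'7', by decide, by simp [pv_val7]⟩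
  · exact ⟨'8', by decide, by simp [pv_val8]⟩
  · exact ⟨'9', by decide, by simp [pv_val9]⟩

theorem pv_toDigitsCore_digits (f : Nat) : ∀ (n : Nat) (l : List Char),
    (∀ c ∈ l, c ∈ pvDIGS) → ∀ c ∈ Nat.toDigitsCore 10 f n l, c ∈ pvDIGS := by
  induction f with
  | zero => intro n l h; simpa [Nat.toDigitsCore] using h
  | succ f ih =>
    intro n l h
    have hd : Nat.digitChar (n % 10) ∈ pvDIGS := by
      have hm : n % 10 < 10 := Nat.mod_lt _ (by norm_num)
      set m := n % 10 with hmm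
      clear_value m
      interval_cases m <;> decide
    have hcons : ∀ c ∈ Nat.digitChar (n % 10) :: l, c ∈ pvDIGS := by
      intro c hc
      rcases List.mem_cons.mp hc with h1 | h1
      · exact h1 ▸ hd
      · exact h c h1
    simp only [Nat.toDigitsCore]
    split
    · exact hcons
    · exact ih _ _ hcons

theorem pv_toChars_digits (n : Int) (hn : 0 ≤ n) : ∀ c ∈ PySem.Int.toChars n, c ∈ pvDIGS := by
  unfold PySem.Int.toChars
  rw [if_neg (by omega)]
  simp only [Nat.toDigits]
  exact pv_toDigitsCore_digits _ _ _ (by simp)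

theorem pv_innerA_fst (digits : List Int) : ∀ (last : Int) (cnt : List Int),
    ((pvInnerA digits last cnt).1 = true) ↔ List.IsChain (· ≤ ·) (last :: digits) := by
  induction digits with
  | nil =>
    intro last cnt
    simp only [pvInnerA]
    exact ⟨fun _ => List.isChain_singleton last, fun _ => trivial⟩
  | cons d rest ih =>
    intro last cnt
    simp only [pvInnerA]
    split
    · next hlt =>
      rw [List.isChain_cons_cons]
      constructor
      · intro h; simp at h
      · rintro ⟨h1, _⟩; exact absurd h1 (by omega)
    · next hge =>
      rw [ih, List.isChain_cons_cons]
      have : last ≤ d := by omega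
      tauto

theorem pv_innerA_snd (digits : List Int) : ∀ (last : Int) (cnt : List Int),
    List.IsChain (· ≤ ·) (last :: digits) →
    (pvInnerA digits last cnt).2 = digits.foldl pvBump cnt := by
  induction digits with
  | nil => intro last cnt _; simp [pvInnerA]
  | cons d rest ih =>
    intro last cnt hch
    rw [List.isChain_cons_cons] at hch
    simp only [pvInnerA, List.foldl_cons]
    rw [if_neg (by omega)]
    exact ih d (pvBump cnt d) hch.2

theorem pv_counter_spec (digits : List Int) :
    ∀ (cnt : List Int), (∀ d ∈ digits, 0 ≤ d ∧ d < 10) → cnt.length = 10 →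
    (digits.foldl pvBump cnt).length = 10 ∧
    (∀ j : Nat, j < 10 →
      (digits.foldl pvBump cnt).getD j 0 = cnt.getD j 0 + digits.count (j : Int)) := by
  induction digits with
  | nil => intro cnt _ hlen; exact ⟨hlen, by intro j hj; simp⟩
  | cons d rest ih =>
    intro cnt hd hlen
    obtain ⟨hd0, hd10⟩ := hd d (by simp)
    have hdn : d.toNat < cnt.length := by omega
    have hbump : pvBump cnt d = cnt.set d.toNat (cnt.getD d.toNat 0 + 1) := by
      unfold pvBump
      rw [PySem.List.pySetD_of_nonneg cnt _ hd0]
      congr 1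
      simp [PySem.List.pyGetD, PySem.List.pyGet?_of_nonneg cnt hd0, List.getD_eq_getElem?_getD]
    have hlen' : (pvBump cnt d).length = 10 := by rw [hbump, List.length_set, hlen]
    have hrest : ∀ x ∈ rest, 0 ≤ x ∧ x < 10 := fun x hx => hd x (by simp [hx])
    obtain ⟨ihl, ihg⟩ := ih (pvBump cnt d) hrest hlen'
    refine ⟨by simpa using ihl, ?_⟩
    intro j hj
    simp only [List.foldl_cons]
    rw [ihg j hj]
    have hset : (pvBump cnt d).getD j 0
        = if d.toNat = j then cnt.getD j 0 + 1 else cnt.getD j 0 := by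
      rw [hbump]
      by_cases hjd : d.toNat = j
      · subst hjd
        simp [List.getD_eq_getElem?_getD, hdn]
      · simp [List.getD_eq_getElem?_getD, hjd]
    have hcnt : (d :: rest).count (j : Int)
        = rest.count (j : Int) + if (d == (j : Int)) = true then 1 else 0 := List.count_cons
    rw [hset, hcnt]
    by_cases hjd : d.toNat = j
    · have hb : (d == (j : Int)) = true := by simp only [beq_iff_eq]; omega
      simp only [if_pos hjd, hb]
      push_cast
      omega
    · have hb : (d == (j : Int)) = false := by simp only [beq_eq_false_iff_ne, ne_eq]; omega
      simp only [if_neg hjd, hb]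
      push_cast
      omega

theorem pv_any_two (cnt : List Int) (hlen : cnt.length = 10) :
    (cnt.any (fun x => x == 2) = true) ↔ ∃ j : Nat, j < 10 ∧ cnt.getD j 0 = 2 := by
  rw [List.any_eq_true]
  constructor
  · rintro ⟨x, hx, hx2⟩
    obtain ⟨j, hj, rfl⟩ := List.mem_iff_getElem.mp hx
    refine ⟨j, by omega, ?_⟩
    rw [List.getD_eq_getElem?_getD, List.getElem?_eq_getElem hj]
    simp only [beq_iff_eq] at hx2
    simpa using hx2
  · rintro ⟨j, hj, h⟩
    have hj' : j < cnt.length := by omega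
    refine ⟨cnt[j], List.getElem_mem hj', ?_⟩
    rw [List.getD_eq_getElem?_getD, List.getElem?_eq_getElem hj'] at h
    simp only [beq_iff_eq]
    simpa using h

theorem pv_count_map (cs : List Char) (hdigs : ∀ c ∈ cs, c ∈ pvDIGS)
    (d : Char) (hd : d ∈ pvDIGS) :
    (cs.map pvDigitVal).count (pvDigitVal d) = cs.count d := by
  induction cs with
  | nil => simp
  | cons c rest ih =>
    have hc : c ∈ pvDIGS := hdigs c (by simp)
    have hrest : ∀ x ∈ rest, x ∈ pvDIGS := fun x hx => hdigs x (by simp [hx])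
    simp only [List.map_cons, List.count_cons, ih hrest]
    congr 1
    have hb : (pvDigitVal c == pvDigitVal d) = (c == d) := by
      by_cases h : c = d
      · simp [h]
      · have : pvDigitVal c ≠ pvDigitVal d := fun he => h ((pv_digitVal_inj c hc d hd).mp he)
        simp [h, this]
    rw [hb]

-- the two per-number boolean tests agree for n ≥ 0
theorem pv_perNumber (n : Int) (hn : 0 ≤ n) :
    ((pvInnerA ((PySem.Int.toChars n).map pvDigitVal) 0 (List.replicate 10 (0 : Int))).1
      && (pvInnerA ((PySem.Int.toChars n).map pvDigitVal) 0 (List.replicate 10 (0 : Int))).2.any (fun d => d == 2))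
    = ((PySem.Int.toChars n == PySem.List.sorted (PySem.Int.toChars n) (fun c => c) false)
      && "0123456789".toList.any (fun d => PySem.List.count (PySem.Int.toChars n) d == 2)) := by
  have hdigs : ∀ c ∈ PySem.Int.toChars n, c ∈ pvDIGS := pv_toChars_digits n hn
  set cs := PySem.Int.toChars n with hcs
  set digits := cs.map pvDigitVal with hdigits
  have hdb : ∀ d ∈ digits, 0 ≤ d ∧ d < 10 := by
    intro d hd
    obtain ⟨c, hc, rfl⟩ := List.mem_map.mp hd
    exact pv_digitVal_bounds c (hdigs c hc)
  rw [Bool.eq_iff_iff]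
  simp only [Bool.and_eq_true]
  -- order condition
  have hord : ((pvInnerA digits 0 (List.replicate 10 (0 : Int))).1 = true)
      ↔ ((cs == PySem.List.sorted cs (fun c => c) false) = true) := by
    rw [pv_innerA_fst]
    have h1 : List.IsChain (· ≤ ·) ((0 : Int) :: digits) ↔ List.Pairwise (· ≤ ·) digits := by
      rw [List.isChain_iff_pairwise, List.pairwise_cons]
      exact ⟨fun h => h.2, fun h => ⟨fun x hx => (hdb x hx).1, h⟩⟩
    have h2 : List.Pairwise (· ≤ ·) digits ↔ List.Pairwise (· ≤ ·) cs := by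
      rw [hdigits, List.pairwise_map]
      constructor
      · exact fun h => h.imp_of_mem (fun ha hb hr => (pv_digitVal_mono _ (hdigs _ ha) _ (hdigs _ hb)).mp hr)
      · exact fun h => h.imp_of_mem (fun ha hb hr => (pv_digitVal_mono _ (hdigs _ ha) _ (hdigs _ hb)).mpr hr)
    have h3 : List.Pairwise (· ≤ ·) cs ↔ ((cs == PySem.List.sorted cs (fun c => c) false) = true) := by
      rw [beq_iff_eq]
      constructor
      · intro hp; exact (PySem.List.sorted_eq_self_of_pairwise cs (fun c => c) hp).symm
      · intro he
        have hp := PySem.List.sorted_pairwise cs (fun c => c)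
        rw [← he] at hp
        simpa using hp
    rw [h1, h2, h3]
  -- count condition (once the scan succeeded, the counter holds exact digit counts)
  have hcntiff : ∀ (_ : (pvInnerA digits 0 (List.replicate 10 (0 : Int))).1 = true),
      (((pvInnerA digits 0 (List.replicate 10 (0 : Int))).2.any (fun d => d == 2)) = true)
      ↔ (("0123456789".toList.any (fun d => PySem.List.count cs d == 2)) = true) := by
    intro hvalid
    have hchain : List.IsChain (· ≤ ·) ((0 : Int) :: digits) := (pv_innerA_fst digits 0 _).mp hvalid
    rw [pv_innerA_snd digits 0 _ hchain]
    have hrep : (List.replicate 10 (0 : Int)).length = 10 := by simp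
    obtain ⟨hlen, hg⟩ := pv_counter_spec digits _ hdb hrep
    rw [pv_any_two _ hlen]
    rw [pv_digs_eq, List.any_eq_true]
    constructor
    · rintro ⟨j, hj, hcount⟩
      obtain ⟨d, hd, hvd⟩ := pv_digitVal_surj j hj
      refine ⟨d, hd, ?_⟩
      have hcm := pv_count_map cs hdigs d hd
      rw [hvd] at hcm
      rw [hg j hj, List.getD_replicate (0 : Int) hj] at hcount
      rw [PySem.List.count_eq]
      simp only [beq_iff_eq]
      rw [← hdigits] at hcm
      omega
    · rintro ⟨d, hd, hcount⟩
      have hb := pv_digitVal_bounds d hd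
      have hjlt : (pvDigitVal d).toNat < 10 := by omega
      refine ⟨(pvDigitVal d).toNat, hjlt, ?_⟩
      rw [hg _ hjlt, List.getD_replicate (0 : Int) hjlt]
      have hcast : (((pvDigitVal d).toNat : Nat) : Int) = pvDigitVal d := by omega
      rw [hcast]
      have hcm := pv_count_map cs hdigs d hd
      rw [← hdigits] at hcm
      rw [PySem.List.count_eq] at hcount
      simp only [beq_iff_eq] at hcount
      omega
  constructor
  · rintro ⟨h1, h2⟩; exact ⟨hord.mp h1, (hcntiff h1).mp h2⟩
  · rintro ⟨h1, h2⟩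
    have h1' := hord.mpr h1
    exact ⟨h1', (hcntiff h1').mpr h2⟩

theorem pv_foldl_shapes (l : List Int) (p q : Int → Bool) (h : ∀ x ∈ l, p x = q x) :
    ((l.foldl (fun ns x => if p x then ns ++ [x] else ns) ([] : List Int)).length : Int)
      = l.foldl (fun c x => if q x then c + 1 else c) 0 := by
  rw [PySem.List.foldl_append_if, PySem.List.foldl_if_add_one]
  simp only [List.nil_append, List.length_map, zero_add]
  rw [← List.countP_eq_length_filter]
  exact_mod_cast congrArg Nat.cast (List.countP_congr (fun x hx => by rw [h x hx]))

-- ===== VERDICT (by name: the statement is the Claim_ definition above) =====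
theorem analyseNumbers_spec : Claim_equal_analyseNumbers := by
  intro lo hi _ hpre
  unfold Spec_analyseNumbers analyseNumbers analyseNumbers_alt
  by_cases hle : hi ≤ lo
  · rw [PySem.List.pyRange_one_eq_nil hle]
    simp
  · have hlo : 0 ≤ lo := by
      rcases hpre with h | h
      · exact h
      · omega
    have hfun : ∀ x ∈ PySem.List.pyRange lo hi 1,
        ((pvInnerA ((PySem.Int.toChars x).map pvDigitVal) 0 (List.replicate 10 (0 : Int))).1
          && (pvInnerA ((PySem.Int.toChars x).map pvDigitVal) 0 (List.replicate 10 (0 : Int))).2.any (fun d => d == 2))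
        = ((PySem.Int.toChars x == PySem.List.sorted (PySem.Int.toChars x) (fun c => c) false)
          && "0123456789".toList.any (fun d => PySem.List.count (PySem.Int.toChars x) d == 2)) := by
      intro x hx
      have hx0 : 0 ≤ x := by
        have := (PySem.List.mem_pyRange_one.mp hx).1
        omega
      exact pv_perNumber x hx0
    exact pv_foldl_shapes (PySem.List.pyRange lo hi 1) _ _ hfun
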